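-- pv_equiv track=rewrite | github.com/Droshow/copidock | copidock/interactive/detection.py | suggest_output_from_patterns
-- ===== SOURCE A (Python) =====
-- from typing import Dict, List, Any, Optional
--
-- def suggest_output_from_patterns(modified_files: List[str], recent_commits: List[Dict]) -> str:
--     """Suggest expected output based on change patterns"""
--
--     # Analyze file patterns
--     if any('test' in f.lower() for f in modified_files):
--         return "Comprehensive test coverage"
--     elif any(f.endswith('.tf') or 'deploy' in f.lower() for f in modified_files):
--         return "Deployment plan"
--     elif any('api' in f.lower() or 'handler' in f.lower() or 'lambda' in f.lower() for f in modified_files):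
--         return "Working API endpoint"
--     elif any('doc' in f.lower() or 'readme' in f.lower() for f in modified_files):
--         return "Updated documentation"
--     elif any('db' in f.lower() or 'migration' in f.lower() for f in modified_files):
--         return "Database migration"
--     elif any('config' in f.lower() or f.endswith('.yml') or f.endswith('.yaml') for f in modified_files):
--         return "Configuration update"
--
--     # Analyze commit messages
--     commit_text = ' '.join(commit.get('message', '') for commit in recent_commits).lower()
--     if 'fix' in commit_text or 'bug' in commit_text:
--         return "Bug fix"
--     elif 'feature' in commit_text or 'add' in commit_text:
--         return "New feature"
--     elif 'refactor' in commit_text or 'cleanup' in commit_text: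
--         return "Code refactoring"
--
--     return "Working implementation"
-- ===== SOURCE B (Python) =====
-- def suggest_output_from_patterns(modified_files, recent_commits):
--     # One pass over the files: collect six category flags, then pick the first
--     # matching label in priority order.
--     t = d = a = o = m = c = False
--     for f in modified_files:
--         lf = f.lower()
--         if 'test' in lf:
--             t = True
--         if f.endswith('.tf') or 'deploy' in lf:
--             d = True
--         if 'api' in lf or 'handler' in lf or 'lambda' in lf:
--             a = True
--         if 'doc' in lf or 'readme' in lf:
--             o = True
--         if 'db' in lf or 'migration' in lf:
--             m = True
--         if 'config' in lf or f.endswith('.yml') or f.endswith('.yaml'):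
--             c = True
--     for flag, label in ((t, "Comprehensive test coverage"),
--                         (d, "Deployment plan"),
--                         (a, "Working API endpoint"),
--                         (o, "Updated documentation"),
--                         (m, "Database migration"),
--                         (c, "Configuration update")):
--         if flag:
--             return label
--     text = ' '.join(commit.get('message', '') for commit in recent_commits).lower()
--     for words, label in ((('fix', 'bug'), "Bug fix"),
--                          (('feature', 'add'), "New feature"),
--                          (('refactor', 'cleanup'), "Code refactoring")):
--         if any(w in text for w in words):
--             return label
--     return "Working implementation"
-- ===== Notes on version B (the rewrite author's own statement) =====
-- stated objective: alternative
-- what changed: Replaces A's six separate any() scans over modified_files with a single pass that collects six category flags (each file lowercased once) followed by a table-driven first-match over (flag,label) pairs, and folds the three commit-message branches into a data-driven loop over (keywords,label) pairs.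
import Mathlib
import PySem

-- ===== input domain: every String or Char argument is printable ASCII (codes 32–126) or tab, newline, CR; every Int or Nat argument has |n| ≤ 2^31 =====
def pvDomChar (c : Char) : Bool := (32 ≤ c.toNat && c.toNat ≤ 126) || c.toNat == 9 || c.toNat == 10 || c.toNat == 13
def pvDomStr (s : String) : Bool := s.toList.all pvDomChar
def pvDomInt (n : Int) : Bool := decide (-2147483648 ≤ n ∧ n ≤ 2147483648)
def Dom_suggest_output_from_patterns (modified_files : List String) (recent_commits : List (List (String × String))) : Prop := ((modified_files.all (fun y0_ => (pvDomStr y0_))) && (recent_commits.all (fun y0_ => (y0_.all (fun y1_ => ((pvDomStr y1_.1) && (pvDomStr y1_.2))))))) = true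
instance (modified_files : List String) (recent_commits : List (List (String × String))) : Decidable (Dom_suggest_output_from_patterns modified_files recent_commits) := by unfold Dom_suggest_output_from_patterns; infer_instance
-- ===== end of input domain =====

-- ===== PORT A =====
def suggest_output_from_patterns (modified_files : List String) (recent_commits : List (List (String × String))) : String :=
  if modified_files.any (fun f => PySem.Str.isIn "test" (PySem.Str.lower f)) then
    "Comprehensive test coverage"
  else if modified_files.any (fun f => PySem.Str.endswith f ".tf" || PySem.Str.isIn "deploy" (PySem.Str.lower f)) then
    "Deployment plan"
  else if modified_files.any (fun f => PySem.Str.isIn "api" (PySem.Str.lower f) || PySem.Str.isIn "handler" (PySem.Str.lower f) || PySem.Str.isIn "lambda" (PySem.Str.lower f)) then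
    "Working API endpoint"
  else if modified_files.any (fun f => PySem.Str.isIn "doc" (PySem.Str.lower f) || PySem.Str.isIn "readme" (PySem.Str.lower f)) then
    "Updated documentation"
  else if modified_files.any (fun f => PySem.Str.isIn "db" (PySem.Str.lower f) || PySem.Str.isIn "migration" (PySem.Str.lower f)) then
    "Database migration"
  else if modified_files.any (fun f => PySem.Str.isIn "config" (PySem.Str.lower f) || PySem.Str.endswith f ".yml" || PySem.Str.endswith f ".yaml") then
    "Configuration update"
  else
    let commit_text := PySem.Str.lower (PySem.Str.join " " (recent_commits.map (fun commit => PySem.Dict.getD ⟨commit⟩ "message" "")))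
    if PySem.Str.isIn "fix" commit_text || PySem.Str.isIn "bug" commit_text then
      "Bug fix"
    else if PySem.Str.isIn "feature" commit_text || PySem.Str.isIn "add" commit_text then
      "New feature"
    else if PySem.Str.isIn "refactor" commit_text || PySem.Str.isIn "cleanup" commit_text then
      "Code refactoring"
    else
      "Working implementation"

-- ===== PORT B =====
-- B: one pass collecting six category flags, then a table-driven first match.
def pvAltFlags (modified_files : List String) : Bool × Bool × Bool × Bool × Bool × Bool :=
  modified_files.foldl (fun s f =>
    let lf := PySem.Str.lower f
    (s.1 || PySem.Str.isIn "test" lf,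
     s.2.1 || (PySem.Str.endswith f ".tf" || PySem.Str.isIn "deploy" lf),
     s.2.2.1 || (PySem.Str.isIn "api" lf || PySem.Str.isIn "handler" lf || PySem.Str.isIn "lambda" lf),
     s.2.2.2.1 || (PySem.Str.isIn "doc" lf || PySem.Str.isIn "readme" lf),
     s.2.2.2.2.1 || (PySem.Str.isIn "db" lf || PySem.Str.isIn "migration" lf),
     s.2.2.2.2.2 || (PySem.Str.isIn "config" lf || PySem.Str.endswith f ".yml" || PySem.Str.endswith f ".yaml")))
    (false, false, false, false, false, false)

def pvFirstFlag : List (Bool × String) → Option String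
  | [] => none
  | (flag, label) :: rest => if flag then some label else pvFirstFlag rest

def pvFirstKeyword (text : String) : List (List String × String) → Option String
  | [] => none
  | (words, label) :: rest =>
      if words.any (fun w => PySem.Str.isIn w text) then some label else pvFirstKeyword text rest

def suggest_output_from_patterns_alt (modified_files : List String) (recent_commits : List (List (String × String))) : String :=
  let fl := pvAltFlags modified_files
  match pvFirstFlag [(fl.1, "Comprehensive test coverage"), (fl.2.1, "Deployment plan"),
                     (fl.2.2.1, "Working API endpoint"), (fl.2.2.2.1, "Updated documentation"),
                     (fl.2.2.2.2.1, "Database migration"), (fl.2.2.2.2.2, "Configuration update")] with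
  | some label => label
  | none =>
    let text := PySem.Str.lower (PySem.Str.join " " (recent_commits.map (fun commit => PySem.Dict.getD ⟨commit⟩ "message" "")))
    match pvFirstKeyword text [(["fix", "bug"], "Bug fix"), (["feature", "add"], "New feature"),
                               (["refactor", "cleanup"], "Code refactoring")] with
    | some label => label
    | none => "Working implementation"

-- ===== PRECONDITION & SPEC =====
def Spec_suggest_output_from_patterns (modified_files : List String) (recent_commits : List (List (String × String))) (out : String) : Prop := out = suggest_output_from_patterns_alt modified_files recent_commits
instance (modified_files : List String) (recent_commits : List (List (String × String))) (out : String) : Decidable (Spec_suggest_output_from_patterns modified_files recent_commits out) := by unfold Spec_suggest_output_from_patterns; infer_instance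

-- ===== CLAIM (what is proved, stated in full; the proofs are below) =====
def Claim_equal_suggest_output_from_patterns : Prop := ∀ (modified_files : List String) (recent_commits : List (List (String × String))), Dom_suggest_output_from_patterns modified_files recent_commits → Spec_suggest_output_from_patterns modified_files recent_commits (suggest_output_from_patterns modified_files recent_commits)

-- ===== LEMMAS AND PROOFS =====
theorem pvAltFlags_eq (modified_files : List String) :
    pvAltFlags modified_files =
      (modified_files.any (fun f => PySem.Str.isIn "test" (PySem.Str.lower f)),
       modified_files.any (fun f => PySem.Str.endswith f ".tf" || PySem.Str.isIn "deploy" (PySem.Str.lower f)),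
       modified_files.any (fun f => PySem.Str.isIn "api" (PySem.Str.lower f) || PySem.Str.isIn "handler" (PySem.Str.lower f) || PySem.Str.isIn "lambda" (PySem.Str.lower f)),
       modified_files.any (fun f => PySem.Str.isIn "doc" (PySem.Str.lower f) || PySem.Str.isIn "readme" (PySem.Str.lower f)),
       modified_files.any (fun f => PySem.Str.isIn "db" (PySem.Str.lower f) || PySem.Str.isIn "migration" (PySem.Str.lower f)),
       modified_files.any (fun f => PySem.Str.isIn "config" (PySem.Str.lower f) || PySem.Str.endswith f ".yml" || PySem.Str.endswith f ".yaml")) := by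
  have gen : ∀ (l : List String) (s : Bool × Bool × Bool × Bool × Bool × Bool),
      l.foldl (fun s f =>
        let lf := PySem.Str.lower f
        (s.1 || PySem.Str.isIn "test" lf,
         s.2.1 || (PySem.Str.endswith f ".tf" || PySem.Str.isIn "deploy" lf),
         s.2.2.1 || (PySem.Str.isIn "api" lf || PySem.Str.isIn "handler" lf || PySem.Str.isIn "lambda" lf),
         s.2.2.2.1 || (PySem.Str.isIn "doc" lf || PySem.Str.isIn "readme" lf),
         s.2.2.2.2.1 || (PySem.Str.isIn "db" lf || PySem.Str.isIn "migration" lf),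
         s.2.2.2.2.2 || (PySem.Str.isIn "config" lf || PySem.Str.endswith f ".yml" || PySem.Str.endswith f ".yaml"))) s =
      (s.1 || l.any (fun f => PySem.Str.isIn "test" (PySem.Str.lower f)),
       s.2.1 || l.any (fun f => PySem.Str.endswith f ".tf" || PySem.Str.isIn "deploy" (PySem.Str.lower f)),
       s.2.2.1 || l.any (fun f => PySem.Str.isIn "api" (PySem.Str.lower f) || PySem.Str.isIn "handler" (PySem.Str.lower f) || PySem.Str.isIn "lambda" (PySem.Str.lower f)),
       s.2.2.2.1 || l.any (fun f => PySem.Str.isIn "doc" (PySem.Str.lower f) || PySem.Str.isIn "readme" (PySem.Str.lower f)),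
       s.2.2.2.2.1 || l.any (fun f => PySem.Str.isIn "db" (PySem.Str.lower f) || PySem.Str.isIn "migration" (PySem.Str.lower f)),
       s.2.2.2.2.2 || l.any (fun f => PySem.Str.isIn "config" (PySem.Str.lower f) || PySem.Str.endswith f ".yml" || PySem.Str.endswith f ".yaml")) := by
    intro l
    induction l with
    | nil => intro s; simp
    | cons x xs ih =>
      intro s
      simp only [List.foldl_cons, List.any_cons, ih]
      simp [Bool.or_assoc]
  simpa [pvAltFlags] using gen modified_files (false, false, false, false, false, false)

-- ===== VERDICT (by name: the statement is the Claim_ definition above) =====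
theorem suggest_output_from_patterns_spec : Claim_equal_suggest_output_from_patterns := by
  intro modified_files recent_commits _
  unfold Spec_suggest_output_from_patterns
  unfold suggest_output_from_patterns suggest_output_from_patterns_alt
  rw [pvAltFlags_eq]
  simp only [pvFirstFlag, pvFirstKeyword, List.any_cons, List.any_nil, Bool.or_false]
  split_ifs <;> simp_all
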